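-- pv_equiv track=rewrite | github.com/trueJomi/Pagina-para-datos-de-ip | Valor_IP.py | multicast
-- ===== SOURCE A (Python) =====
-- MULTICAST=[[224],[240]]
--
-- def separar_punteado(Ip_separar):
--     partes_ip=Ip_separar.split(".")
--     numero_bin=[]
--     for octeto in partes_ip:
--         if Validar_int(octeto):
--             octeto=int(octeto)
--             numero_sin=de_decimal_a_bin(octeto)
--             numero=adaptar_octeto(numero_sin)
--             numero_bin.append(numero)
--         else:
--             return []
--     return numero_bin
--
-- def de_decimal_a_bin(decimal):
--     numero=''
--     while decimal>=1:
--         numero=numero+str(decimal% 2)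
--         decimal=decimal//2
--     numero=numero[::-1]
--     return numero
--
-- def adaptar_octeto(binary):
--     if 8==len(binary):
--         return binary
--     else:
--         for i in range(8-len(binary)):
--             binary='0'+binary
--         return  binary
--
-- def Validar_int(valor):
--     try:
--         preuba=int(valor)
--         return True
--     except:
--         return False
--
-- def Lista_decimal(binario):
--     lista=[]
--     for i in binario:
--         lista.append(de_bin_a_decimal(i))
--     return lista
--
-- def de_bin_a_decimal(binary):
--     binary=binary[::-1]
--     numero=0
--     cont=0
--     for i in binary:
--         i=int(i)
--         numero=numero+(i*(2**cont))
--         cont=cont+1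
--     return numero
--
-- def multicast(ip):
--     ip_comparado=Lista_decimal(separar_punteado(ip))
--     limite_inferior=MULTICAST[0]
--     limite_superior=MULTICAST[1]
--     count=0
--     for i in range(len(limite_inferior)):
--         if limite_inferior[i]<=ip_comparado[i] and ip_comparado[i]<limite_superior[i]:
--             count=count+1
--     if count==len(limite_inferior):
--         return True
--     else:
--         return False
-- ===== SOURCE B (Python) =====
-- def multicast(ip):
--     octets = [int(p) for p in ip.split(".")]
--     return 224 <= octets[0] < 240
-- ===== Notes on version B (the rewrite author's own statement) =====
-- stated objective: simpler
-- what changed: B drops A's decimal->binary string->decimal round-trip of every octet and A's count-loop over the one-element bound lists, and just parses the octets and compares the first one to the range 224..239 directly.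
import Mathlib
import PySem

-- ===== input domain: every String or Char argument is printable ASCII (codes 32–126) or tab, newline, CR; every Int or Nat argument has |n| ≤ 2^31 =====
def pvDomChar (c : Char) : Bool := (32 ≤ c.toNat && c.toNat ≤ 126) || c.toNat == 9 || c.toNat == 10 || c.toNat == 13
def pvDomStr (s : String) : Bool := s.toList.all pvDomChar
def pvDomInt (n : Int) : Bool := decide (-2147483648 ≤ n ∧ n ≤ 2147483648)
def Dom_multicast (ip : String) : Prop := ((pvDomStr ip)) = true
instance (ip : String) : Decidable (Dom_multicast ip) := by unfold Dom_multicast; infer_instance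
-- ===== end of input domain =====

-- B drops A's decimal->binary-string->decimal round-trip and count loop and compares the
-- first parsed octet to 224..239 directly (objective: simpler).

-- ===== PORT A =====
def MULTICAST : List (List Int) := [[224], [240]]

-- Validar_int(valor): int(valor) succeeds?
def validarInt (valor : String) : Bool := (PySem.Int.ofStr? valor).isSome

-- the while-loop of de_decimal_a_bin; builds the bits LSB-first
def deDecimalABinLoop (decimal : Int) (numero : List Char) : List Char :=
  if 1 ≤ decimal then
    deDecimalABinLoop (PySem.Int.floordiv decimal 2)
      (numero ++ PySem.Int.toChars (PySem.Int.mod decimal 2))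
  else numero
termination_by decimal.toNat
decreasing_by
  all_goals
    have hd2 := PySem.Int.floordiv_eq_ediv_of_pos (a := decimal) (b := 2) (by omega)
    omega

-- de_decimal_a_bin; numero[::-1] is the reversal of the char list (exact)
def deDecimalABin (decimal : Int) : List Char :=
  (deDecimalABinLoop decimal []).reverse

-- adaptar_octeto: prepend '0' (8 - len) times ('0'+binary prepends one char; exact)
def adaptarOcteto (binary : List Char) : List Char :=
  if (8 : Int) = binary.length then binary
  else (PySem.List.pyRange 0 (8 - (binary.length : Int)) 1).foldl
    (fun b _ => '0' :: b) binary

-- the loop of separar_punteado, with its early 'return []'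
def separarPunteadoGo : List String → List (List Char) → List (List Char)
  | [], numeroBin => numeroBin
  | octeto :: rest, numeroBin =>
    if validarInt octeto then
      -- int(octeto) cannot raise here (Validar_int just succeeded), so getD 0 is exact
      separarPunteadoGo rest
        (numeroBin ++ [adaptarOcteto (deDecimalABin ((PySem.Int.ofStr? octeto).getD 0))])
    else []

def separarPunteado (ipSeparar : String) : List (List Char) :=
  -- Ip_separar.split("."): sep ≠ "", so split? is some; getD [] is exact
  separarPunteadoGo ((PySem.Str.split? ipSeparar ".").getD []) []

-- de_bin_a_decimal; binary[::-1] is reversal; int(i) on a one-char string of the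
-- '0'/'1' digits A produces never raises, so getD 0 is exact
def deBinADecimal (binary : List Char) : Int :=
  (binary.reverse.foldl
    (fun (p : Int × Nat) i =>
      (p.1 + ((PySem.Int.ofStr? (String.mk [i])).getD 0) * 2 ^ p.2, p.2 + 1))
    (0, 0)).1

def listaDecimal (binario : List (List Char)) : List Int :=
  binario.map deBinADecimal

def multicast (ip : String) : Bool :=
  let ipComparado := listaDecimal (separarPunteado ip)
  let limiteInferior := (PySem.List.pyGet? MULTICAST 0).getD []
  let limiteSuperior := (PySem.List.pyGet? MULTICAST 1).getD []
  let count := (PySem.List.pyRange 0 (limiteInferior.length : Int) 1).foldl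
    (fun count i =>
      match PySem.List.pyGet? limiteInferior i, PySem.List.pyGet? ipComparado i,
            PySem.List.pyGet? limiteSuperior i with
      | some lo, some x, some hi => if lo ≤ x ∧ x < hi then count + 1 else count
      | _, _, _ => count)   -- IndexError in Python: excluded by Pre_multicast
    (0 : Int)
  if count = (limiteInferior.length : Int) then true else false

-- ===== PORT B =====
def multicast_alt (ip : String) : Bool :=
  -- [int(p) for p in ip.split(".")]
  match ((PySem.Str.split? ip ".").getD []).mapM PySem.Int.ofStr? with
  | none => false   -- ValueError in Python: excluded by Pre_multicast
  | some octets =>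
    match PySem.List.pyGet? octets 0 with
    | some v => decide (224 ≤ v ∧ v < 240)
    | none => false   -- unreachable: split always yields at least one part

-- ===== PRECONDITION & SPEC =====
-- Pre_ excludes exactly the inputs with an octet int() rejects, on which A raises IndexError (and B raises ValueError).
def Pre_multicast (ip : String) : Prop :=
  ∀ p ∈ (PySem.Str.split? ip ".").getD [], (PySem.Int.ofStr? p).isSome = true
instance (ip : String) : Decidable (Pre_multicast ip) := by unfold Pre_multicast; infer_instance

def pvWitness_multicast : String := "224.0.0.1"

def Spec_multicast (ip : String) (out : Bool) : Prop := out = multicast_alt ip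
instance (ip : String) (out : Bool) : Decidable (Spec_multicast ip out) := by unfold Spec_multicast; infer_instance

-- ===== CLAIM (what is proved, stated in full; the proofs are below) =====
def Claim_equal_multicast : Prop :=
  ∀ (ip : String), Dom_multicast ip → Pre_multicast ip → Spec_multicast ip (multicast ip)

-- ===== LEMMAS AND PROOFS =====

-- digit value of a one-char string, as A computes it
def pvDigit (c : Char) : Int := (PySem.Int.ofStr? (String.mk [c])).getD 0

-- LSB-first value of a bit list
def pvVal : List Char → Int
  | [] => 0
  | c :: t => pvDigit c + 2 * pvVal t

theorem pvVal_replicate_zero (k : Nat) : pvVal (List.replicate k '0') = 0 := by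
  induction k with
  | zero => simp [pvVal]
  | succ n ih =>
    have h0 : pvDigit '0' = 0 := by decide
    simp [List.replicate_succ, pvVal, ih, h0]

theorem pvVal_append_zeros (xs : List Char) (k : Nat) :
    pvVal (xs ++ List.replicate k '0') = pvVal xs := by
  induction xs with
  | nil => simpa using pvVal_replicate_zero k
  | cons c t ih => simp [pvVal, ih]

theorem deBinADecimal_foldl (l : List Char) :
    ∀ (n : Int) (c : Nat),
      (l.foldl (fun (p : Int × Nat) i =>
        (p.1 + ((PySem.Int.ofStr? (String.mk [i])).getD 0) * 2 ^ p.2, p.2 + 1)) (n, c)).1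
      = n + 2 ^ c * pvVal l := by
  induction l with
  | nil => intro n c; simp [pvVal]
  | cons x t ih =>
    intro n c
    simp only [List.foldl_cons, ih, pvVal, pvDigit]
    ring

theorem deBinADecimal_eq_pvVal_reverse (l : List Char) :
    deBinADecimal l = pvVal l.reverse := by
  simpa [deBinADecimal] using deBinADecimal_foldl l.reverse 0 0

theorem deDecimalABinLoop_append (d : Int) (acc : List Char) :
    deDecimalABinLoop d acc = acc ++ deDecimalABinLoop d [] := by
  by_cases h : 1 ≤ d
  · conv_lhs => rw [deDecimalABinLoop]
    conv_rhs => rw [deDecimalABinLoop]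
    rw [if_pos h, if_pos h,
        deDecimalABinLoop_append (PySem.Int.floordiv d 2) (acc ++ PySem.Int.toChars (PySem.Int.mod d 2)),
        deDecimalABinLoop_append (PySem.Int.floordiv d 2) ([] ++ PySem.Int.toChars (PySem.Int.mod d 2))]
    simp
  · conv_lhs => rw [deDecimalABinLoop]
    conv_rhs => rw [deDecimalABinLoop]
    rw [if_neg h, if_neg h]; simp
termination_by d.toNat
decreasing_by
  all_goals
    have hd2 := PySem.Int.floordiv_eq_ediv_of_pos (a := d) (b := 2) (by omega)
    omega

theorem pvVal_binChars (d : Int) : pvVal (deDecimalABinLoop d []) = max d 0 := by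
  by_cases h : 1 ≤ d
  · rw [deDecimalABinLoop, if_pos h, deDecimalABinLoop_append]
    have ih := pvVal_binChars (PySem.Int.floordiv d 2)
    have hm : PySem.Int.mod d 2 = 0 ∨ PySem.Int.mod d 2 = 1 := by
      have h1 := PySem.Int.mod_nonneg d (b := 2) (by omega)
      have h2 := PySem.Int.mod_lt d (b := 2) (by omega)
      omega
    have hdiv : PySem.Int.floordiv d 2 * 2 + PySem.Int.mod d 2 = d :=
      PySem.Int.floordiv_mul_add_mod d 2
    have hq : 0 ≤ PySem.Int.floordiv d 2 := by
      rw [PySem.Int.floordiv_eq_ediv_of_pos (by omega)]; omega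
    have hc0 : PySem.Int.toChars (0 : Int) = ['0'] := by decide
    have hc1 : PySem.Int.toChars (1 : Int) = ['1'] := by decide
    have hd0 : pvDigit '0' = 0 := by decide
    have hd1 : pvDigit '1' = 1 := by decide
    rcases hm with hm | hm <;>
      simp only [hm, hc0, hc1, List.nil_append, List.cons_append, pvVal, hd0, hd1, ih] <;>
      omega
  · rw [deDecimalABinLoop, if_neg h]
    simp only [pvVal]
    omega
termination_by d.toNat
decreasing_by
  all_goals
    have hd2 := PySem.Int.floordiv_eq_ediv_of_pos (a := d) (b := 2) (by omega)
    omega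

theorem foldl_cons_zero {α : Type} (xs : List α) (l : List Char) :
    xs.foldl (fun b _ => '0' :: b) l = List.replicate xs.length '0' ++ l := by
  induction xs generalizing l with
  | nil => simp
  | cons x t ih =>
    simp only [List.foldl_cons, ih, List.length_cons]
    rw [List.replicate_succ']
    simp

theorem roundtrip (d : Int) :
    deBinADecimal (adaptarOcteto (deDecimalABin d)) = max d 0 := by
  have hpad : ∀ (l : List Char), adaptarOcteto l = List.replicate (8 - l.length) '0' ++ l := by
    intro l
    unfold adaptarOcteto
    by_cases h8 : (8 : Int) = (l.length : Int)
    · rw [if_pos h8]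
      have : 8 - l.length = 0 := by omega
      simp [this]
    · rw [if_neg h8]
      by_cases hle : l.length ≤ 8
      · have hr : PySem.List.pyRange 0 (8 - (l.length : Int)) 1 =
            PySem.List.pyRange 0 ((8 - l.length : Nat) : Int) 1 := by
          congr 1; omega
        rw [hr, PySem.List.pyRange_zero_natCast, foldl_cons_zero]
        simp
      · have hnil : PySem.List.pyRange 0 (8 - (l.length : Int)) 1 = [] :=
          PySem.List.pyRange_one_eq_nil (by omega)
        have h0 : 8 - l.length = 0 := by omega
        simp [hnil, h0]
  rw [hpad, deBinADecimal_eq_pvVal_reverse]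
  simp only [List.reverse_append, List.reverse_replicate, deDecimalABin, List.reverse_reverse]
  rw [pvVal_append_zeros, pvVal_binChars]

theorem separarPunteadoGo_all (l : List String)
    (h : ∀ p ∈ l, (PySem.Int.ofStr? p).isSome = true) (acc : List (List Char)) :
    separarPunteadoGo l acc =
      acc ++ l.map (fun o => adaptarOcteto (deDecimalABin ((PySem.Int.ofStr? o).getD 0))) := by
  induction l generalizing acc with
  | nil => simp [separarPunteadoGo]
  | cons o rest ih =>
    have ho : validarInt o = true := by simpa [validarInt] using h o (by simp)
    rw [separarPunteadoGo, if_pos ho, ih (fun p hp => h p (by simp [hp]))]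
    simp

theorem mapM_of_all_isSome (l : List String)
    (h : ∀ p ∈ l, (PySem.Int.ofStr? p).isSome = true) :
    l.mapM PySem.Int.ofStr? = some (l.map (fun p => (PySem.Int.ofStr? p).getD 0)) := by
  induction l with
  | nil => simp
  | cons o rest ih =>
    have ho := h o (by simp)
    rcases Option.isSome_iff_exists.mp ho with ⟨v, hv⟩
    rw [List.mapM_cons, hv, ih (fun p hp => h p (by simp [hp]))]
    simp [hv]

-- ===== VERDICT (by name: the statement is the Claim_ definition above) =====
theorem multicast_spec : Claim_equal_multicast := by
  intro ip _ hpre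
  unfold Spec_multicast multicast multicast_alt
  rw [mapM_of_all_isSome _ hpre]
  unfold Pre_multicast at hpre
  cases hparts : (PySem.Str.split? ip ".").getD [] with
  | nil =>
    simp [separarPunteado, separarPunteadoGo, listaDecimal, hparts, MULTICAST,
      PySem.List.pyGet?, PySem.List.pyIdx?, PySem.List.pyRange]
  | cons p0 rest =>
    rw [hparts] at hpre
    have hsep : separarPunteado ip =
        (p0 :: rest).map (fun o => adaptarOcteto (deDecimalABin ((PySem.Int.ofStr? o).getD 0))) := by
      rw [separarPunteado, hparts, separarPunteadoGo_all _ hpre]; simp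
    simp only [hsep, listaDecimal, List.map_cons, List.map_map]
    have hrange : PySem.List.pyRange 0 (( ([(224:Int)] : List Int).length : Int)) 1 = [0] := by decide
    have hli : (PySem.List.pyGet? MULTICAST 0).getD [] = [224] := by decide
    have hls : (PySem.List.pyGet? MULTICAST 1).getD [] = [240] := by decide
    simp only [hli, hls, hrange, List.foldl_cons, List.foldl_nil]
    have hg1 : PySem.List.pyGet? ([(224:Int)]) 0 = some 224 := by decide
    have hg2 : PySem.List.pyGet? ([(240:Int)]) 0 = some 240 := by decide
    have hg3 : PySem.List.pyGet?
        (deBinADecimal (adaptarOcteto (deDecimalABin ((PySem.Int.ofStr? p0).getD 0))) ::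
          List.map (deBinADecimal ∘ fun o => adaptarOcteto (deDecimalABin ((PySem.Int.ofStr? o).getD 0))) rest) 0
        = some (deBinADecimal (adaptarOcteto (deDecimalABin ((PySem.Int.ofStr? p0).getD 0)))) :=
      PySem.List.pyGet?_zero_cons _ _
    rw [hg1, hg2, hg3]
    rw [roundtrip]
    rw [PySem.List.pyGet?_zero_cons]
    rcases Option.isSome_iff_exists.mp (hpre p0 (by simp)) with ⟨v, hv⟩
    simp only [hv, Option.getD_some]
    by_cases hc : 224 ≤ max v 0 ∧ max v 0 < 240
    · have : 224 ≤ v ∧ v < 240 := by constructor <;> omega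
      simp [this]
    · have : ¬ (224 ≤ v ∧ v < 240) := by omega
      simp [this]
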